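-- pv_equiv track=rewrite | github.com/MingPunyaGit/Belajar-tgl-09 | Nota.py | deret_ajaib_rekursif
-- ===== SOURCE A (Python) =====
-- def deret_ajaib_rekursif(n):
--     if n == 1:
--         return 1
--     elif n == 2:
--         return 3
--     elif n == 3:
--         return 5
--     else:
--         return deret_ajaib_rekursif(n - 2) * ((n + 1) // 2)
-- ===== SOURCE B (Python) =====
-- def deret_ajaib_rekursif(n):
--     if n == 1:
--         return 1
--     if n == 2:
--         return 3
--     if n == 3:
--         return 5
--     result = 1
--     k = n
--     while k not in (1, 2, 3):
--         result *= (k + 1) // 2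
--         k -= 2
--     base = 1 if k == 1 else (3 if k == 2 else 5)
--     return result * base
-- ===== Notes on version B (the rewrite author's own statement) =====
-- stated objective: simpler
-- what changed: replaces the recursive definition with a bottom-up iterative loop accumulating the product of (k+1)//2 factors, then multiplying by the base value
import Mathlib
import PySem

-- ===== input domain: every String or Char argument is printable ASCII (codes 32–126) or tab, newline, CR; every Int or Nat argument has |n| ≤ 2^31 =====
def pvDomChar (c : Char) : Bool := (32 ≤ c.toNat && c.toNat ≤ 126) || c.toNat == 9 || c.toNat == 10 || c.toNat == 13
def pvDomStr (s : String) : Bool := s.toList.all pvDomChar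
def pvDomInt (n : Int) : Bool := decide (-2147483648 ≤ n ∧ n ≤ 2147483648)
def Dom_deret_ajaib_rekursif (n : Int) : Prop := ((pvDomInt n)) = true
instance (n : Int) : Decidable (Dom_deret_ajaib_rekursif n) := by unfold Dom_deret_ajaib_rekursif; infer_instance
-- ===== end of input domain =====

-- B replaces A's recursion with a bottom-up iterative loop over the same factors (objective: simpler decomposition).
-- For n ≤ 0 the Python A raises RecursionError (B's loop diverges); Pre_ excludes those inputs.

-- ===== PORT A =====
-- fuel guard only makes the recursion total; for 1 ≤ n, n.toNat fuel suffices (each step consumes 1 fuel, n drops by 2).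
def deretFuelA (fuel : Nat) (n : Int) : Int :=
  match fuel with
  | 0 => 0
  | fuel + 1 =>
    if n = 1 then 1
    else if n = 2 then 3
    else if n = 3 then 5
    else deretFuelA fuel (n - 2) * (PySem.Int.floordiv (n + 1) 2)

def deret_ajaib_rekursif (n : Int) : Int := deretFuelA n.toNat n

-- ===== PORT B =====
-- fuel guard only makes the while-loop total; for 1 ≤ n, n.toNat fuel suffices.
def altLoop (fuel : Nat) (result k : Int) : Int × Int :=
  match fuel with
  | 0 => (result, k)
  | fuel + 1 =>
    if k = 1 ∨ k = 2 ∨ k = 3 then (result, k)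
    else altLoop fuel (result * (PySem.Int.floordiv (k + 1) 2)) (k - 2)

def deret_ajaib_rekursif_alt (n : Int) : Int :=
  if n = 1 then 1
  else if n = 2 then 3
  else if n = 3 then 5
  else
    let rk := altLoop n.toNat 1 n
    rk.1 * (if rk.2 = 1 then 1 else if rk.2 = 2 then 3 else 5)

-- ===== PRECONDITION & SPEC =====
-- Pre_ excludes n ≤ 0, where the Python A never returns (RecursionError) and B's loop diverges.
def Pre_deret_ajaib_rekursif (n : Int) : Prop := 1 ≤ n
instance (n : Int) : Decidable (Pre_deret_ajaib_rekursif n) := by unfold Pre_deret_ajaib_rekursif; infer_instance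
def pvWitness_deret_ajaib_rekursif : Int := 5

def Spec_deret_ajaib_rekursif (n : Int) (out : Int) : Prop := out = deret_ajaib_rekursif_alt n
instance (n : Int) (out : Int) : Decidable (Spec_deret_ajaib_rekursif n out) := by unfold Spec_deret_ajaib_rekursif; infer_instance

-- ===== CLAIM (what is proved, stated in full; the proofs are below) =====
def Claim_equal_deret_ajaib_rekursif : Prop := ∀ (n : Int), Dom_deret_ajaib_rekursif n → Pre_deret_ajaib_rekursif n → Spec_deret_ajaib_rekursif n (deret_ajaib_rekursif n)

-- ===== LEMMAS AND PROOFS =====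

-- loop invariant: running the loop then applying the base multiplies the accumulator by A's result
theorem altLoop_spec (m : Nat) (r n : Int) (h1 : 1 ≤ n) (hm : n.toNat ≤ m) :
    (altLoop m r n).1 * (if (altLoop m r n).2 = 1 then 1 else if (altLoop m r n).2 = 2 then 3 else 5)
      = r * deretFuelA m n := by
  induction m generalizing r n with
  | zero => omega
  | succ m ih =>
    simp only [altLoop, deretFuelA]
    by_cases hb : n = 1 ∨ n = 2 ∨ n = 3
    · rcases hb with h | h | h <;> subst h <;> simp
    · have hn4 : 4 ≤ n := by omega
      simp only [if_neg hb, if_neg (show ¬ n = 1 by omega), if_neg (show ¬ n = 2 by omega),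
        if_neg (show ¬ n = 3 by omega)]
      rw [ih (r * PySem.Int.floordiv (n + 1) 2) (n - 2) (by omega) (by omega)]
      ring

-- ===== VERDICT (by name: the statement is the Claim_ definition above) =====
theorem deret_ajaib_rekursif_spec : Claim_equal_deret_ajaib_rekursif := by
  intro n _ hpre
  unfold Spec_deret_ajaib_rekursif deret_ajaib_rekursif deret_ajaib_rekursif_alt
  have h1 : (1 : Int) ≤ n := hpre
  split_ifs with e1 e2 e3
  · subst e1; decide
  · subst e2; decide
  · subst e3; decide
  · have := altLoop_spec n.toNat 1 n h1 (le_refl _)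
    simp only [one_mul] at this
    exact this.symm
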